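-- pv_equiv track=rewrite | github.com/nontile/CodingTest | 2_Binary_.py | solution
-- ===== SOURCE A (Python) =====
-- from collections import deque
--
-- def solution(num):
--     bi = format(num, 'b')
--     dq = deque(maxlen=2)
--     rs = [0]
--     for i, b in enumerate(bi):
--         if b == '1':
--             dq.append(i)
--         if len(dq) == 2:
--             rs.append(dq[1] - dq[0] -1)
--
--     return max(rs)
-- ===== SOURCE B (Python) =====
-- def solution(num):
--     # longest run of zeros strictly between two set bits of |num|
--     runs = format(num, 'b').rstrip('0').split('1')
--     return max((len(r) for r in runs[1:]), default=0)
-- ===== Notes on version B (the rewrite author's own statement) =====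
-- stated objective: simpler
-- what changed: A streams over every bit with a two-element deque and a growing list of gap candidates; B strips the trailing zeros from the binary string, splits it on '1' once, and returns the longest inner piece.
import Mathlib
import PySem

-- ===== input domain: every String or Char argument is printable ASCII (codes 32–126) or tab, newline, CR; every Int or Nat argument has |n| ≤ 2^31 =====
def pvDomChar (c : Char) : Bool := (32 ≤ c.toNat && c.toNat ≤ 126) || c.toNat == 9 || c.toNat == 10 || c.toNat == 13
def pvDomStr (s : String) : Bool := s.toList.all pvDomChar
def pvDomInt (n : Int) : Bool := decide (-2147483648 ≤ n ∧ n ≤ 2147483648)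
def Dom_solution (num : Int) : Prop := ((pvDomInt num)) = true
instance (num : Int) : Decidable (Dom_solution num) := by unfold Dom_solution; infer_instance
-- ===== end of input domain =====

-- B replaces A's per-bit deque scan by one string partition: rstrip the trailing
-- zeros, split on '1', and take the longest inner piece (objective: simpler).

-- ===== PORT A =====
-- helper shared by both ports: format(num, 'b') as a list of characters (hand port, exact:
-- binary digits of |num|, most significant first, with a leading '-' for negative num)
def toBits (n : Nat) : List Char :=
  if n = 0 then [] else toBits (n / 2) ++ [if n % 2 == 1 then '1' else '0']
decreasing_by exact Nat.div_lt_self (Nat.pos_of_ne_zero (by assumption)) (by norm_num)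

def binNat (n : Nat) : List Char := if n = 0 then ['0'] else toBits n

def toBin (num : Int) : List Char :=
  if num < 0 then '-' :: binNat (-num).toNat else binNat num.toNat

-- the body of A's 'for i, b in enumerate(bi)' loop; st = (dq, rs)
def stepA (st : List Int × List Int) (ib : Int × Char) : List Int × List Int :=
  -- 'if b == '1': dq.append(i)'  (deque(maxlen=2): a full deque drops its left element)
  let dq := if ib.2 == '1' then
              (if st.1.length == 2 then st.1.tail ++ [ib.1] else st.1 ++ [ib.1])
            else st.1
  -- 'if len(dq) == 2: rs.append(dq[1] - dq[0] - 1)'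
  let rs := if dq.length == 2 then
              st.2 ++ [PySem.List.pyGetD dq 1 0 - PySem.List.pyGetD dq 0 0 - 1]
            else st.2
  (dq, rs)

def solution (num : Int) : Int :=
  let bi := toBin num
  let st := (PySem.List.enumerate bi 0).foldl stepA ([], [0])
  -- max(rs); rs starts as [0] and only grows, so the default is never used
  PySem.List.maxD st.2 (fun x => x) 0

-- ===== PORT B =====
def solution_alt (num : Int) : Int :=
  -- format(num, 'b').rstrip('0'): drop exactly the trailing '0' characters (hand port, exact)
  let runs := PySem.Chars.splitOn (((toBin num).reverse.dropWhile (· == '0')).reverse) ['1']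
  -- max((len(r) for r in runs[1:]), default=0)
  PySem.List.maxD ((runs.drop 1).map (fun r => (r.length : Int))) (fun x => x) 0

-- ===== PRECONDITION & SPEC =====
def Spec_solution (num : Int) (out : Int) : Prop := out = solution_alt num
instance (num : Int) (out : Int) : Decidable (Spec_solution num out) := by unfold Spec_solution; infer_instance

-- ===== CLAIM (what is proved, stated in full; the proofs are below) =====
def Claim_equal_solution : Prop := ∀ (num : Int), Dom_solution num → Spec_solution num (solution num)

-- ===== LEMMAS AND PROOFS =====

-- reference function: longest zero run closed by a '1', with `cur` zeros already pending
def auxG : List Char → Int → Int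
  | [], _ => 0
  | c :: t, cur => if c = '1' then max cur (auxG t 0) else auxG t (cur + 1)

-- skip to the first '1', then count
def leadG : List Char → Int
  | [] => 0
  | c :: t => if c = '1' then auxG t 0 else leadG t

-- clean structural model of str.split for a one-character separator
def mySplit (a : Char) : List Char → List (List Char)
  | [] => [[]]
  | c :: t => if c = a then [] :: mySplit a t
              else match mySplit a t with
                   | [] => [[c]]
                   | p :: r => (c :: p) :: r

-- 'max(rs)' on a nonempty list, as computed by the ports
def M (rs : List Int) : Int := PySem.List.maxD rs (fun x => x) 0

lemma M_cons (x : Int) (t : List Int) : M (x :: t) = t.foldl max x := by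
  simp [M, PySem.List.maxD, PySem.List.max?_id_cons]

lemma M_append (rs : List Int) (x : Int) (h : rs ≠ []) : M (rs ++ [x]) = max (M rs) x := by
  obtain ⟨r0, rr, rfl⟩ := List.exists_cons_of_ne_nil h
  simp [M_cons, List.foldl_append]

lemma foldl_max_max (l : List Int) (a b : Int) :
    l.foldl max (max a b) = max a (l.foldl max b) := by
  induction l generalizing b with
  | nil => simp
  | cons x t ih => simp only [List.foldl_cons, max_assoc, ih]

lemma auxG_nonneg (t : List Char) (cur : Int) (h : 0 ≤ cur) : 0 ≤ auxG t cur := by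
  induction t generalizing cur with
  | nil => simp [auxG]
  | cons c r ih =>
    simp only [auxG]
    split_ifs
    · exact le_trans (ih 0 le_rfl) (le_max_right _ _)
    · exact ih _ (by omega)

lemma auxG_ge (t : List Char) (cur : Int) (h : '1' ∈ t) : cur ≤ auxG t cur := by
  induction t generalizing cur with
  | nil => simp at h
  | cons c r ih =>
    simp only [auxG]
    by_cases hc : c = '1'
    · simp [hc]
    · have : '1' ∈ r := by rcases List.mem_cons.1 h with h' | h' <;> [exact absurd h'.symm hc; exact h']
      simp only [hc, if_false]
      have := ih (cur + 1) this
      omega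

lemma auxG_append (t z : List Char) (cur : Int) (hz : ∀ c ∈ z, c ≠ '1') :
    auxG (t ++ z) cur = auxG t cur := by
  induction t generalizing cur with
  | nil =>
    simp only [List.nil_append, auxG]
    induction z generalizing cur with
    | nil => simp [auxG]
    | cons c r ih =>
      have hc : c ≠ '1' := hz c (by simp)
      simp only [auxG, hc, if_false]
      exact ih (fun c h => hz c (by simp [h])) _
  | cons c t ih => simp only [List.cons_append, auxG, ih]

lemma leadG_append (t z : List Char) (hz : ∀ c ∈ z, c ≠ '1') :
    leadG (t ++ z) = leadG t := by
  induction t with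
  | nil =>
    simp only [List.nil_append, leadG]
    induction z with
    | nil => rfl
    | cons c r ih =>
      have hc : c ≠ '1' := hz c (by simp)
      simp only [leadG, hc, if_false]
      exact ih (fun c h => hz c (by simp [h]))
  | cons c t ih => simp only [List.cons_append, leadG, auxG_append _ _ _ hz, ih]

lemma stepA_two_one (p q i0 : Int) (rs : List Int) :
    stepA ([p, q], rs) (i0, '1') = ([q, i0], rs ++ [i0 - q - 1]) := by
  simp [stepA, PySem.List.pyGetD, PySem.List.pyGet?, PySem.List.pyIdx?]

lemma stepA_two_other (p q i0 : Int) (rs : List Int) (c : Char) (hc : ¬ c = '1') :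
    stepA ([p, q], rs) (i0, c) = ([p, q], rs ++ [q - p - 1]) := by
  simp [stepA, hc, PySem.List.pyGetD, PySem.List.pyGet?, PySem.List.pyIdx?]

lemma stepA_one_one (p i0 : Int) (rs : List Int) :
    stepA ([p], rs) (i0, '1') = ([p, i0], rs ++ [i0 - p - 1]) := by
  simp [stepA, PySem.List.pyGetD, PySem.List.pyGet?, PySem.List.pyIdx?]

lemma stepA_one_other (p i0 : Int) (rs : List Int) (c : Char) (hc : ¬ c = '1') :
    stepA ([p], rs) (i0, c) = ([p], rs) := by
  simp [stepA, hc]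

lemma stepA_nil_one (i0 : Int) (rs : List Int) : stepA ([], rs) (i0, '1') = ([i0], rs) := by
  simp [stepA]

lemma stepA_nil_other (i0 : Int) (rs : List Int) (c : Char) (hc : ¬ c = '1') :
    stepA ([], rs) (i0, c) = ([], rs) := by
  simp [stepA, hc]

lemma lemA2 (t : List Char) (i0 p q : Int) (rs : List Int)
    (hne : rs ≠ []) (hq : q < i0) (hg : q - p - 1 ≤ M rs) (h0 : 0 ≤ M rs) :
    M (((PySem.List.enumerate t i0).foldl stepA ([p, q], rs)).2)
      = max (M rs) (auxG t (i0 - q - 1)) := by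
  induction t generalizing i0 p q rs with
  | nil => simp [PySem.List.enumerate_nil, auxG]; omega
  | cons c r ih =>
    rw [PySem.List.enumerate_cons, List.foldl_cons]
    by_cases hc : c = '1'
    · subst hc
      rw [stepA_two_one]
      rw [ih (i0+1) q i0 _ (by simp) (by omega)
            (by rw [M_append _ _ hne]; exact le_max_right _ _)
            (le_trans h0 (by rw [M_append _ _ hne]; exact le_max_left _ _))]
      rw [M_append _ _ hne]
      simp only [auxG]
      have : i0 + 1 - i0 - 1 = (0 : Int) := by ring
      rw [this, max_assoc]
      simp
    · rw [stepA_two_other _ _ _ _ _ hc]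
      rw [ih (i0+1) p q _ (by simp) (by omega)
            (by rw [M_append _ _ hne]; exact le_max_right _ _)
            (le_trans h0 (by rw [M_append _ _ hne]; exact le_max_left _ _))]
      rw [M_append _ _ hne, max_eq_left hg]
      simp only [auxG, if_neg hc]
      have e : i0 + 1 - q - 1 = i0 - q - 1 + 1 := by ring
      rw [e]

lemma lemA1 (t : List Char) (i0 p : Int) (rs : List Int)
    (hne : rs ≠ []) (hp : p < i0) (h0 : 0 ≤ M rs) :
    M (((PySem.List.enumerate t i0).foldl stepA ([p], rs)).2)
      = max (M rs) (auxG t (i0 - p - 1)) := by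
  induction t generalizing i0 rs with
  | nil => simp [PySem.List.enumerate_nil, auxG]; omega
  | cons c r ih =>
    rw [PySem.List.enumerate_cons, List.foldl_cons]
    by_cases hc : c = '1'
    · subst hc
      rw [stepA_one_one]
      rw [lemA2 r (i0+1) p i0 _ (by simp) (by omega)
            (by rw [M_append _ _ hne]; exact le_max_right _ _)
            (le_trans h0 (by rw [M_append _ _ hne]; exact le_max_left _ _))]
      rw [M_append _ _ hne]
      simp only [auxG]
      have : i0 + 1 - i0 - 1 = (0 : Int) := by ring
      rw [this, max_assoc]
      simp
    · rw [stepA_one_other _ _ _ _ hc]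
      rw [ih (i0+1) rs hne (by omega) h0]
      simp only [auxG, if_neg hc]
      congr 2
      ring

lemma lemA0 (t : List Char) (i0 : Int) (rs : List Int)
    (hne : rs ≠ []) (h0 : 0 ≤ M rs) :
    M (((PySem.List.enumerate t i0).foldl stepA ([], rs)).2)
      = max (M rs) (leadG t) := by
  induction t generalizing i0 with
  | nil => simp [PySem.List.enumerate_nil, leadG]; omega
  | cons c r ih =>
    rw [PySem.List.enumerate_cons, List.foldl_cons]
    by_cases hc : c = '1'
    · subst hc
      rw [stepA_nil_one]
      rw [lemA1 r (i0+1) i0 rs hne (by omega) h0]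
      simp only [leadG]
      congr 2
      ring
    · rw [stepA_nil_other _ _ _ hc, ih (i0+1)]
      simp [leadG, hc]

lemma thmA (num : Int) : solution num = max 0 (leadG (toBin num)) := by
  have h := lemA0 (toBin num) 0 [0] (by simp) (by simp [M_cons])
  simpa [solution, M, M_cons] using h

-- ===== B-side: splitOn = mySplit =====

lemma mySplit_ne_nil (a : Char) (t : List Char) : mySplit a t ≠ [] := by
  cases t with
  | nil => simp [mySplit]
  | cons c r =>
    simp only [mySplit]
    split_ifs
    · simp
    · cases h : mySplit a r <;> simp

lemma go_eq (a : Char) (fuel : Nat) (l cur : List Char) (acc : List (List Char))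
    (h : l.length ≤ fuel) :
    PySem.Chars.splitOn.go [a] fuel l cur acc
      = acc.reverse ++ (mySplit a l).modifyHead (cur.reverse ++ ·) := by
  induction l generalizing fuel cur acc with
  | nil =>
    cases fuel <;> simp [PySem.Chars.splitOn.go, mySplit]
  | cons c t ih =>
    cases fuel with
    | zero => simp at h
    | succ f =>
      rw [PySem.Chars.splitOn.go]
      have hlen : t.length ≤ f := by simpa using h
      by_cases hc : c = a
      · subst hc
        have hpre : List.isPrefixOf [c] (c :: t) = true := by simp [List.isPrefixOf]
        rw [if_pos hpre]
        have hd : List.drop [c].length (c :: t) = t := by simp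
        rw [hd, ih f [] (cur.reverse :: acc) hlen]
        cases hm : mySplit c t with
        | nil => exact absurd hm (mySplit_ne_nil c t)
        | cons p r => simp [mySplit, hm]
      · have hpre : List.isPrefixOf [a] (c :: t) = false := by
          simp [List.isPrefixOf]; exact fun h' => absurd h'.symm hc
        rw [if_neg (by simp [hpre])]
        rw [ih f (c :: cur) acc hlen]
        cases hm : mySplit a t with
        | nil => exact absurd hm (mySplit_ne_nil a t)
        | cons p r => simp [mySplit, hc, hm]

lemma splitOn_eq_mySplit (a : Char) (l : List Char) :
    PySem.Chars.splitOn l [a] = mySplit a l := by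
  have h := go_eq a (l.length + 1) l [] [] (by omega)
  rw [PySem.Chars.splitOn, h]
  cases hm : mySplit a l with
  | nil => simp
  | cons p r => simp

-- ===== B-side: split pieces vs auxG =====

def pieceVal (ps : List (List Char)) (cur : Int) : Int :=
  match ps with
  | [] => cur
  | p0 :: rest => (rest.map (fun r => (r.length : Int))).foldl max (cur + p0.length)

lemma lemC (t : List Char) (cur : Int) (h0 : 0 ≤ cur)
    (hc : t = [] ∨ t.getLast? = some '1') :
    pieceVal (mySplit '1' t) cur = max cur (auxG t cur) := by
  induction t generalizing cur with
  | nil => simp [mySplit, pieceVal, auxG]; omega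
  | cons c t' ih =>
    rcases hc with hc | hc
    · simp at hc
    have hc' : t' = [] ∨ t'.getLast? = some '1' := by
      cases t' with
      | nil => exact Or.inl rfl
      | cons d r => exact Or.inr (by rwa [List.getLast?_cons_cons] at hc)
    by_cases hc1 : c = '1'
    · subst hc1
      obtain ⟨p0, rest, hm⟩ : ∃ p0 rest, mySplit '1' t' = p0 :: rest :=
        List.exists_cons_of_ne_nil (mySplit_ne_nil _ _)
      have hIH := ih 0 le_rfl hc'
      rw [hm] at hIH
      simp only [pieceVal, zero_add] at hIH
      simp only [mySplit, reduceIte, pieceVal, hm, List.map_cons, List.foldl_cons,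
        List.length_nil, Nat.cast_zero, add_zero]
      rw [foldl_max_max, hIH]
      simp only [auxG, reduceIte]
      rw [max_eq_right (auxG_nonneg t' 0 le_rfl), ← max_assoc, max_self]
    · have ht' : t' ≠ [] := by
        intro h; subst h; simp [List.getLast?] at hc; exact hc1 hc
      have hlast : t'.getLast? = some '1' := hc'.resolve_left ht'
      have hmem : '1' ∈ t' := List.mem_of_getLast? hlast
      obtain ⟨p0, rest, hm⟩ : ∃ p0 rest, mySplit '1' t' = p0 :: rest :=
        List.exists_cons_of_ne_nil (mySplit_ne_nil _ _)
      have hIH := ih (cur + 1) (by omega) hc'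
      rw [hm] at hIH
      simp only [pieceVal] at hIH
      simp only [mySplit, if_neg hc1, hm, pieceVal, List.length_cons]
      have e : cur + ((p0.length : Int) + 1) = cur + 1 + (p0.length : Int) := by ring
      rw [show ((p0.length + 1 : Nat) : Int) = (p0.length : Int) + 1 by push_cast; ring, e, hIH]
      have hge := auxG_ge t' (cur + 1) hmem
      simp only [auxG, if_neg hc1]
      rw [max_eq_right (by omega), max_eq_right (by omega)]

lemma lemB (t : List Char) (hc : t.getLast? = some '1' ∨ '1' ∉ t) :
    ((mySplit '1' t).tail.map (fun r => (r.length : Int))).foldl max 0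
      = max 0 (leadG t) := by
  induction t with
  | nil => simp [mySplit, leadG]
  | cons c t' ih =>
    by_cases hc1 : c = '1'
    · subst hc1
      have hcond : t' = [] ∨ t'.getLast? = some '1' := by
        rcases hc with hc | hc
        · cases t' with
          | nil => exact Or.inl rfl
          | cons d r => exact Or.inr (by rwa [List.getLast?_cons_cons] at hc)
        · exact absurd (by simp) hc
      obtain ⟨p0, rest, hm⟩ : ∃ p0 rest, mySplit '1' t' = p0 :: rest :=
        List.exists_cons_of_ne_nil (mySplit_ne_nil _ _)
      have hC := lemC t' 0 le_rfl hcond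
      rw [hm] at hC
      simp only [pieceVal, zero_add] at hC
      simp only [mySplit, reduceIte, List.tail_cons, hm, List.map_cons, List.foldl_cons,
        leadG]
      rw [max_eq_right (by positivity : (0 : Int) ≤ (p0.length : Int)), hC]
    · have hcond : t'.getLast? = some '1' ∨ '1' ∉ t' := by
        rcases hc with hc | hc
        · cases t' with
          | nil => simp [List.getLast?] at hc; exact absurd hc hc1
          | cons d r => exact Or.inl (by rwa [List.getLast?_cons_cons] at hc)
        · exact Or.inr (fun h => hc (by simp [h]))
      obtain ⟨p0, rest, hm⟩ : ∃ p0 rest, mySplit '1' t' = p0 :: rest :=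
        List.exists_cons_of_ne_nil (mySplit_ne_nil _ _)
      have hI := ih hcond
      rw [hm] at hI
      simp only [mySplit, if_neg hc1, hm, List.tail_cons, leadG]
      simpa using hI

-- the toBin-specific facts

lemma toBits_mem (n : Nat) (c : Char) (h : c ∈ toBits n) : c = '0' ∨ c = '1' := by
  induction n using Nat.strong_induction_on with
  | _ n ih =>
    rw [toBits] at h
    by_cases h0 : n = 0
    · simp [h0] at h
    · rw [if_neg h0] at h
      rcases List.mem_append.1 h with h' | h'
      · exact ih (n / 2) (Nat.div_lt_self (Nat.pos_of_ne_zero h0) (by norm_num)) h'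
      · rcases List.mem_singleton.1 h' with rfl
        by_cases hb : n % 2 == 1 <;> simp [hb]

lemma binNat_mem (n : Nat) (c : Char) (h : c ∈ binNat n) : c = '0' ∨ c = '1' := by
  rw [binNat] at h
  split_ifs at h
  · simp at h; simp [h]
  · exact toBits_mem n c h

lemma toBin_mem (num : Int) (c : Char) (h : c ∈ toBin num) : c = '-' ∨ c = '0' ∨ c = '1' := by
  rw [toBin] at h
  split_ifs at h
  · rcases List.mem_cons.1 h with rfl | h'
    · exact Or.inl rfl
    · rcases binNat_mem _ _ h' with h'' | h'' <;> simp [h'']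
  · rcases binNat_mem _ _ h with h'' | h'' <;> simp [h'']

lemma rstrip_decomp (s : List Char) :
    s = (s.reverse.dropWhile (· == '0')).reverse ++ (s.reverse.takeWhile (· == '0')).reverse
    ∧ ∀ c ∈ (s.reverse.takeWhile (· == '0')).reverse, c ≠ '1' := by
  constructor
  · rw [← List.reverse_append, List.takeWhile_append_dropWhile, List.reverse_reverse]
  · intro c hcmem
    have := List.mem_takeWhile_imp (List.mem_reverse.1 hcmem)
    simp at this
    simp [this]

lemma cond_rstrip (num : Int) :
    (((toBin num).reverse.dropWhile (· == '0')).reverse).getLast? = some '1'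
    ∨ '1' ∉ ((toBin num).reverse.dropWhile (· == '0')).reverse := by
  set s := toBin num with hs
  set d := s.reverse.dropWhile (· == '0') with hd
  by_cases h1 : '1' ∈ d.reverse
  · left
    have hne : d ≠ [] := by intro h; rw [h] at h1; simp at h1
    have hx : d.reverse.getLast? = some (d.head hne) := by
      rw [List.getLast?_reverse, List.head?_eq_some_head hne]
    have hx0 : (d.head hne == '0') = false := List.head_dropWhile_not _ hne
    have hxs : d.head hne ∈ s := by
      have : d.head hne ∈ d := List.head_mem hne
      exact List.mem_reverse.1 (List.Sublist.mem this (List.dropWhile_sublist _))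
    rcases toBin_mem num _ hxs with hm | hm | hm
    · -- the last kept character cannot be '-': '-' occurs only in front of the digits
      exfalso
      obtain ⟨hdec, -⟩ := rstrip_decomp s
      rw [← hd] at hdec
      by_cases hneg : num < 0
      · have hsval : s = '-' :: binNat (-num).toNat := by rw [hs, toBin, if_pos hneg]
        have hlast : d.reverse.getLast? = some '-' := by rw [hx, hm]
        cases he : d.reverse with
        | nil => rw [he] at h1; simp at h1
        | cons e s'' =>
          have hsplit : e :: (s'' ++ (s.reverse.takeWhile (· == '0')).reverse) = '-' :: binNat (-num).toNat := by
            rw [← hsval]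
            conv_rhs => rw [hdec, he]
            simp
          have he' : e = '-' := (List.cons.injEq _ _ _ _ ▸ hsplit).1
          have hb : s'' ++ (s.reverse.takeWhile (· == '0')).reverse = binNat (-num).toNat :=
            (List.cons.injEq _ _ _ _ ▸ hsplit).2
          cases hs'' : s'' with
          | nil =>
            rw [he, hs'', he'] at h1; simp at h1
          | cons f r =>
            have : s''.getLast? = some '-' := by
              rw [he, hs''] at hlast
              rw [hs'']
              rwa [List.getLast?_cons_cons] at hlast
            have hmem : '-' ∈ s'' := List.mem_of_getLast? this
            have : '-' ∈ binNat (-num).toNat := hb ▸ List.mem_append.2 (Or.inl hmem)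
            rcases binNat_mem _ _ this with h' | h' <;> simp at h'
      · have : ¬ ('-' ∈ s) := by
          intro hmem
          rw [hs, toBin, if_neg hneg] at hmem
          rcases binNat_mem _ _ hmem with h' | h' <;> simp at h'
        exact this (hm ▸ hxs)
    · rw [hm] at hx0; simp at hx0
    · rw [hx, hm]
  · right; exact h1

lemma thmB (num : Int) : solution_alt num = max 0 (leadG (toBin num)) := by
  obtain ⟨hdec, hz⟩ := rstrip_decomp (toBin num)
  have hB := lemB _ (cond_rstrip num)
  have hlead : leadG (toBin num) = leadG (((toBin num).reverse.dropWhile (· == '0')).reverse) := by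
    conv_lhs => rw [hdec]
    exact leadG_append _ _ hz
  simp only [solution_alt]
  rw [splitOn_eq_mySplit, hlead, ← hB, List.drop_one]
  cases hm : (mySplit '1' (((toBin num).reverse.dropWhile (· == '0')).reverse)).tail with
  | nil => simp [PySem.List.maxD, PySem.List.max?]
  | cons r0 rr =>
    have h := M_cons ((r0.length : Int)) (rr.map (fun r => (r.length : Int)))
    rw [M] at h
    simp only [List.map_cons]
    rw [h, List.foldl_cons, max_eq_right (by positivity : (0 : Int) ≤ (r0.length : Int))]

-- ===== VERDICT (by name: the statement is the Claim_ definition above) =====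
theorem solution_spec : Claim_equal_solution := by
  intro num _
  unfold Spec_solution
  rw [thmA, thmB]
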